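-- pv_equiv track=rewrite | github.com/JoshuaFarmer/VOP-Processor | bin/as.py | decode
-- ===== SOURCE A (Python) =====
-- def decode(_op, labels):
-- 	idx = []
-- 	tmp = _op.split("\\")
--
-- 	if "," in _op:
-- 		tmp = tmp[1].split(",")
--
-- 	for i in range(len(tmp)):
-- 		tmp[i] = tmp[i].strip()
--
-- 	if "," in _op:
-- 		op1 = [_op.split("\\")[0], tmp[0], tmp[1]]
-- 	elif len(tmp) > 1:
-- 		op1 = [_op.split("\\")[0], tmp[1]]
-- 	else:
-- 		op1 = _op.split("\\")
--
-- 	retstr = op1[0]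
-- 	for i in range(len(op1)):
-- 		op = op1
-- 		if i == 0:
-- 			continue
-- 		for x in range(8):
-- 			if str(op[i]) == f"W{x}":
-- 				retstr += "R"
-- 				idx.append(x)
-- 				x = 8
-- 			elif str(op[i]) == f"X{x}":
-- 				retstr += "R"
-- 				idx.append(x + 8)
-- 				x = 8
-- 			elif str(op[i]) == f"S{x}":
-- 				retstr += "S"
-- 				idx.append(x)
-- 				x = 8
-- 			elif str(op[i]) == f"A":
-- 				retstr += "A"
-- 				break
-- 			elif str(op[i])[0] == f"P":
-- 				retstr += "P1"
-- 				break
-- 			elif str(op[i])[0] == f"#":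
-- 				retstr += "#"+str(str(op[i])[1:])
-- 				break
-- 			elif str(op[i])[0] == f"B":
-- 				retstr += "B#"+str(str(op[i])[2:])
-- 				break
-- 			elif str(op[i])[0] == f"F":
-- 				retstr += "F#"+str(str(op[i])[2:])
-- 				break
-- 			elif str(op[i])[0] == f".":
-- 				retstr += str(str(op[i]))
-- 				break
-- 			elif str(op[i])[0] == f"%":
-- 				# if not found, assume in first pass
-- 				if str(op[i])[1:] in labels:
-- 					retstr += "#"+str(labels[str(op[i])[1:]])
-- 				else:
-- 					retstr += "#0"
-- 				break
-- 			elif str(op[i])[0] == f"$":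
-- 				__op = op[i][1:]
-- 				if str(__op) == f"W{x}":
-- 					retstr += "$R"
-- 					idx.append(x)
-- 					break
-- 				elif str(__op) == f"T{x}":
-- 					retstr += "$R"
-- 					idx.append(x + 8)
-- 					break
-- 				elif str(__op) == f"S{x}":
-- 					retstr += "$S"
-- 					idx.append(x)
-- 					break
-- 				elif str(__op) == f"A":
-- 					retstr += "$A"
-- 					break
-- 		if i < len(op)-1:
-- 			retstr += ","
--
-- 	return retstr, idx
-- ===== SOURCE B (Python) =====
-- _REG = {}
-- _DOLLAR = {}
-- for _x in range(8):
--     _REG["W%d" % _x] = ("R", [_x])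
--     _REG["X%d" % _x] = ("R", [_x + 8])
--     _REG["S%d" % _x] = ("S", [_x])
--     _DOLLAR["W%d" % _x] = ("$R", [_x])
--     _DOLLAR["T%d" % _x] = ("$R", [_x + 8])
--     _DOLLAR["S%d" % _x] = ("$S", [_x])
-- _REG["A"] = ("A", [])
-- _DOLLAR["A"] = ("$A", [])
--
--
-- def _piece(tok, labels):
--     if tok in _REG:
--         return _REG[tok]
--     c = tok[0]
--     if c == "P":
--         return ("P1", [])
--     if c == "#":
--         return ("#" + tok[1:], [])
--     if c == "B":
--         return ("B#" + tok[2:], [])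
--     if c == "F":
--         return ("F#" + tok[2:], [])
--     if c == ".":
--         return (tok, [])
--     if c == "%":
--         key = tok[1:]
--         return (("#" + str(labels[key])) if key in labels else "#0", [])
--     if c == "$":
--         return _DOLLAR.get(tok[1:], ("", []))
--     return ("", [])
--
--
-- def decode(_op, labels):
--     parts = _op.split("\\")
--     if "," in _op:
--         args = parts[1].split(",")
--         operands = [args[0].strip(), args[1].strip()]
--     elif len(parts) > 1:
--         operands = [parts[1].strip()]
--     else:
--         operands = []
--     idx = []
--     pieces = []
--     for tok in operands:
--         s, ix = _piece(tok, labels)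
--         pieces.append(s)
--         idx.extend(ix)
--     return parts[0] + ",".join(pieces), idx
-- ===== Notes on version B (the rewrite author's own statement) =====
-- stated objective: simpler
-- what changed: A's per-operand for-x-in-range(8) loop that re-tests every branch eight times is replaced by a single per-token classifier: precomputed register tables (W/X/S and $-prefixed W/T/S) looked up once, a first-character dispatch for the remaining prefixes, and ','.join over the collected pieces.
import Mathlib
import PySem

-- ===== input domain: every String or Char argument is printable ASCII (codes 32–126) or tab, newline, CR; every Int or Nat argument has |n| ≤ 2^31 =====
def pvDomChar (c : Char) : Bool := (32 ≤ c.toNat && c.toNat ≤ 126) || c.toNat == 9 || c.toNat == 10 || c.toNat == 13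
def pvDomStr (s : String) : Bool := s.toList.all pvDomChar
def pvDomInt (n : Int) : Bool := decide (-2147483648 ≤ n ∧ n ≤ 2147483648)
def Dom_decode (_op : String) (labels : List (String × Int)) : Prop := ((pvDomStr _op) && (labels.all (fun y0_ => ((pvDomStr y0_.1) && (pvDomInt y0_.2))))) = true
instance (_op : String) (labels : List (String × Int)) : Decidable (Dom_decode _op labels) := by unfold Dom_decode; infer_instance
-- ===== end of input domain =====

-- B replaces A's per-operand range(8) re-testing loop by a one-shot table/dispatch classifier (objective: simpler).
-- ===== PORT A =====
-- shared primitive wrapper: Python s.split(sep) with non-empty sep (split? is some here)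
def pvSplit (s sep : String) : List String := (PySem.Str.split? s sep).getD []

def decodeScan : List Int → String → List (String × Int) → String × List Int → String × List Int
  | [], _, _, st => st
  | x :: rest, tok, labels, st =>
    if tok == "W" ++ PySem.Int.toStr x then decodeScan rest tok labels (st.1 ++ "R", st.2 ++ [x])
    else if tok == "X" ++ PySem.Int.toStr x then decodeScan rest tok labels (st.1 ++ "R", st.2 ++ [x + 8])
    else if tok == "S" ++ PySem.Int.toStr x then decodeScan rest tok labels (st.1 ++ "S", st.2 ++ [x])
    else if tok == "A" then (st.1 ++ "A", st.2)
    else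
      let c0 := PySem.List.pyGetD tok.toList 0 (Char.ofNat 0)
      if c0 == 'P' then (st.1 ++ "P1", st.2)
      else if c0 == '#' then (st.1 ++ "#" ++ PySem.Str.slice tok (some 1) none, st.2)
      else if c0 == 'B' then (st.1 ++ "B#" ++ PySem.Str.slice tok (some 2) none, st.2)
      else if c0 == 'F' then (st.1 ++ "F#" ++ PySem.Str.slice tok (some 2) none, st.2)
      else if c0 == '.' then (st.1 ++ tok, st.2)
      else if c0 == '%' then
        match (PySem.Dict.mk labels).get? (PySem.Str.slice tok (some 1) none) with
        | some v => (st.1 ++ "#" ++ PySem.Int.toStr v, st.2)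
        | none => (st.1 ++ "#0", st.2)
      else if c0 == '$' then
        let op2 := PySem.Str.slice tok (some 1) none
        if op2 == "W" ++ PySem.Int.toStr x then (st.1 ++ "$R", st.2 ++ [x])
        else if op2 == "T" ++ PySem.Int.toStr x then (st.1 ++ "$R", st.2 ++ [x + 8])
        else if op2 == "S" ++ PySem.Int.toStr x then (st.1 ++ "$S", st.2 ++ [x])
        else if op2 == "A" then (st.1 ++ "$A", st.2)
        else decodeScan rest tok labels st
      else decodeScan rest tok labels st

def decode (_op : String) (labels : List (String × Int)) : String × List Int :=
  let tmp0 := pvSplit _op "\\"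
  let hasComma := PySem.Str.isIn "," _op
  let tmp1 := if hasComma then pvSplit (PySem.List.pyGetD tmp0 1 "") "," else tmp0
  let tmp := tmp1.map PySem.Str.strip
  let op1 :=
    if hasComma then
      [PySem.List.pyGetD (pvSplit _op "\\") 0 "", PySem.List.pyGetD tmp 0 "", PySem.List.pyGetD tmp 1 ""]
    else if 1 < tmp.length then
      [PySem.List.pyGetD (pvSplit _op "\\") 0 "", PySem.List.pyGetD tmp 1 ""]
    else pvSplit _op "\\"
  (PySem.List.pyRange 0 (PySem.List.len op1) 1).foldl
    (fun st i =>
      if i == 0 then st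
      else
        let st' := decodeScan (PySem.List.pyRange 0 8 1) (PySem.List.pyGetD op1 i "") labels st
        if i < PySem.List.len op1 - 1 then (st'.1 ++ ",", st'.2) else st')
    (PySem.List.pyGetD op1 0 "", [])

-- ===== PORT B =====
def bRegs : PySem.Dict String (String × List Int) × PySem.Dict String (String × List Int) :=
  let p := (PySem.List.pyRange 0 8 1).foldl
    (fun (p : PySem.Dict String (String × List Int) × PySem.Dict String (String × List Int)) x =>
      ((((p.1.insert ("W" ++ PySem.Int.toStr x) ("R", [x])).insert
            ("X" ++ PySem.Int.toStr x) ("R", [x + 8])).insert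
            ("S" ++ PySem.Int.toStr x) ("S", [x])),
       (((p.2.insert ("W" ++ PySem.Int.toStr x) ("$R", [x])).insert
            ("T" ++ PySem.Int.toStr x) ("$R", [x + 8])).insert
            ("S" ++ PySem.Int.toStr x) ("$S", [x]))))
    (PySem.Dict.empty, PySem.Dict.empty)
  (p.1.insert "A" ("A", []), p.2.insert "A" ("$A", []))

def decodePiece (tok : String) (labels : List (String × Int)) : String × List Int :=
  match bRegs.1.get? tok with
  | some r => r
  | none =>
    let c := PySem.List.pyGetD tok.toList 0 (Char.ofNat 0)
    if c == 'P' then ("P1", [])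
    else if c == '#' then ("#" ++ PySem.Str.slice tok (some 1) none, [])
    else if c == 'B' then ("B#" ++ PySem.Str.slice tok (some 2) none, [])
    else if c == 'F' then ("F#" ++ PySem.Str.slice tok (some 2) none, [])
    else if c == '.' then (tok, [])
    else if c == '%' then
      (match (PySem.Dict.mk labels).get? (PySem.Str.slice tok (some 1) none) with
       | some v => "#" ++ PySem.Int.toStr v
       | none => "#0", [])
    else if c == '$' then (bRegs.2).getD (PySem.Str.slice tok (some 1) none) ("", [])
    else ("", [])

def decode_alt (_op : String) (labels : List (String × Int)) : String × List Int :=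
  let parts := pvSplit _op "\\"
  let operands :=
    if PySem.Str.isIn "," _op then
      let args := pvSplit (PySem.List.pyGetD parts 1 "") ","
      [PySem.Str.strip (PySem.List.pyGetD args 0 ""), PySem.Str.strip (PySem.List.pyGetD args 1 "")]
    else if 1 < parts.length then [PySem.Str.strip (PySem.List.pyGetD parts 1 "")]
    else []
  let res := operands.foldl
    (fun (st : List Int × List String) tok =>
      let p := decodePiece tok labels
      (st.1 ++ p.2, st.2 ++ [p.1])) ([], [])
  (PySem.List.pyGetD parts 0 "" ++ PySem.Str.join "," res.2, res.1)

-- ===== PRECONDITION & SPEC =====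
-- Pre_ excludes exactly the inputs on which Python A raises IndexError: a missing "\\"-part or
-- missing second comma-operand (tmp[1]), and operands that are empty after strip (token[0]).
def Pre_decode (_op : String) (labels : List (String × Int)) : Prop :=
  let parts := pvSplit _op "\\"
  if PySem.Str.isIn "," _op = true then
    2 ≤ parts.length ∧
    (let args := pvSplit (parts.getD 1 "") ","
     2 ≤ args.length ∧ PySem.Str.strip (args.getD 0 "") ≠ "" ∧ PySem.Str.strip (args.getD 1 "") ≠ "")
  else if 1 < parts.length then PySem.Str.strip (parts.getD 1 "") ≠ ""
  else True

instance (_op : String) (labels : List (String × Int)) : Decidable (Pre_decode _op labels) := by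
  unfold Pre_decode; infer_instance

def pvWitness_decode : String × (List (String × Int)) := ("MOV\\W1, S2", [("ab", 5)])

def Spec_decode (_op : String) (labels : List (String × Int)) (out : String × List Int) : Prop :=
  out = decode_alt _op labels

instance (_op : String) (labels : List (String × Int)) (out : String × List Int) :
    Decidable (Spec_decode _op labels out) := by unfold Spec_decode; infer_instance

-- ===== CLAIM (what is proved, stated in full; the proofs are below) =====
def Claim_equal_decode : Prop := ∀ (_op : String) (labels : List (String × Int)),
  Dom_decode _op labels → Pre_decode _op labels → Spec_decode _op labels (decode _op labels)

-- ===== LEMMAS AND PROOFS =====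
theorem bRegs_eq : bRegs = (PySem.Dict.mk [("W0",("R",[0])),("X0",("R",[8])),("S0",("S",[0])),("W1",("R",[1])),("X1",("R",[9])),("S1",("S",[1])),("W2",("R",[2])),("X2",("R",[10])),("S2",("S",[2])),("W3",("R",[3])),("X3",("R",[11])),("S3",("S",[3])),("W4",("R",[4])),("X4",("R",[12])),("S4",("S",[4])),("W5",("R",[5])),("X5",("R",[13])),("S5",("S",[5])),("W6",("R",[6])),("X6",("R",[14])),("S6",("S",[6])),("W7",("R",[7])),("X7",("R",[15])),("S7",("S",[7])),("A",("A",[]))],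
  PySem.Dict.mk [("W0",("$R",[0])),("T0",("$R",[8])),("S0",("$S",[0])),("W1",("$R",[1])),("T1",("$R",[9])),("S1",("$S",[1])),("W2",("$R",[2])),("T2",("$R",[10])),("S2",("$S",[2])),("W3",("$R",[3])),("T3",("$R",[11])),("S3",("$S",[3])),("W4",("$R",[4])),("T4",("$R",[12])),("S4",("$S",[4])),("W5",("$R",[5])),("T5",("$R",[13])),("S5",("$S",[5])),("W6",("$R",[6])),("T6",("$R",[14])),("S6",("$S",[6])),("W7",("$R",[7])),("T7",("$R",[15])),("S7",("$S",[7])),("A",("$A",[]))]) := by decide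

theorem beq_str_false (t lit : String) (h : ¬ (t.toList = lit.toList)) : (t == lit) = false :=
  beq_eq_false_iff_ne.mpr (fun e => h (by rw [e]))

theorem get?_mk_nil {ν : Type} (k : String) :
    (PySem.Dict.mk ([] : List (String × ν))).get? k = none := rfl

set_option maxRecDepth 8000 in
set_option maxHeartbeats 2000000 in
theorem scan_eq (tok : String) (labels : List (String × Int)) (r : String) (ix : List Int) :
    decodeScan (PySem.List.pyRange 0 8 1) tok labels (r, ix)
      = (r ++ (decodePiece tok labels).1, ix ++ (decodePiece tok labels).2) := by
  by_cases hW0 : tok = "W0"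
  · rw [hW0]; show (r ++ "R", ix ++ ([0] : List Int)) = _
    simp [show decodePiece "W0" labels = ("R", ([0] : List Int)) from rfl]
  by_cases hX0 : tok = "X0"
  · rw [hX0]; show (r ++ "R", ix ++ ([8] : List Int)) = _
    simp [show decodePiece "X0" labels = ("R", ([8] : List Int)) from rfl]
  by_cases hS0 : tok = "S0"
  · rw [hS0]; show (r ++ "S", ix ++ ([0] : List Int)) = _
    simp [show decodePiece "S0" labels = ("S", ([0] : List Int)) from rfl]
  by_cases hW1 : tok = "W1"
  · rw [hW1]; show (r ++ "R", ix ++ ([1] : List Int)) = _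
    simp [show decodePiece "W1" labels = ("R", ([1] : List Int)) from rfl]
  by_cases hX1 : tok = "X1"
  · rw [hX1]; show (r ++ "R", ix ++ ([9] : List Int)) = _
    simp [show decodePiece "X1" labels = ("R", ([9] : List Int)) from rfl]
  by_cases hS1 : tok = "S1"
  · rw [hS1]; show (r ++ "S", ix ++ ([1] : List Int)) = _
    simp [show decodePiece "S1" labels = ("S", ([1] : List Int)) from rfl]
  by_cases hW2 : tok = "W2"
  · rw [hW2]; show (r ++ "R", ix ++ ([2] : List Int)) = _
    simp [show decodePiece "W2" labels = ("R", ([2] : List Int)) from rfl]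
  by_cases hX2 : tok = "X2"
  · rw [hX2]; show (r ++ "R", ix ++ ([10] : List Int)) = _
    simp [show decodePiece "X2" labels = ("R", ([10] : List Int)) from rfl]
  by_cases hS2 : tok = "S2"
  · rw [hS2]; show (r ++ "S", ix ++ ([2] : List Int)) = _
    simp [show decodePiece "S2" labels = ("S", ([2] : List Int)) from rfl]
  by_cases hW3 : tok = "W3"
  · rw [hW3]; show (r ++ "R", ix ++ ([3] : List Int)) = _
    simp [show decodePiece "W3" labels = ("R", ([3] : List Int)) from rfl]
  by_cases hX3 : tok = "X3"
  · rw [hX3]; show (r ++ "R", ix ++ ([11] : List Int)) = _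
    simp [show decodePiece "X3" labels = ("R", ([11] : List Int)) from rfl]
  by_cases hS3 : tok = "S3"
  · rw [hS3]; show (r ++ "S", ix ++ ([3] : List Int)) = _
    simp [show decodePiece "S3" labels = ("S", ([3] : List Int)) from rfl]
  by_cases hW4 : tok = "W4"
  · rw [hW4]; show (r ++ "R", ix ++ ([4] : List Int)) = _
    simp [show decodePiece "W4" labels = ("R", ([4] : List Int)) from rfl]
  by_cases hX4 : tok = "X4"
  · rw [hX4]; show (r ++ "R", ix ++ ([12] : List Int)) = _
    simp [show decodePiece "X4" labels = ("R", ([12] : List Int)) from rfl]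
  by_cases hS4 : tok = "S4"
  · rw [hS4]; show (r ++ "S", ix ++ ([4] : List Int)) = _
    simp [show decodePiece "S4" labels = ("S", ([4] : List Int)) from rfl]
  by_cases hW5 : tok = "W5"
  · rw [hW5]; show (r ++ "R", ix ++ ([5] : List Int)) = _
    simp [show decodePiece "W5" labels = ("R", ([5] : List Int)) from rfl]
  by_cases hX5 : tok = "X5"
  · rw [hX5]; show (r ++ "R", ix ++ ([13] : List Int)) = _
    simp [show decodePiece "X5" labels = ("R", ([13] : List Int)) from rfl]
  by_cases hS5 : tok = "S5"
  · rw [hS5]; show (r ++ "S", ix ++ ([5] : List Int)) = _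
    simp [show decodePiece "S5" labels = ("S", ([5] : List Int)) from rfl]
  by_cases hW6 : tok = "W6"
  · rw [hW6]; show (r ++ "R", ix ++ ([6] : List Int)) = _
    simp [show decodePiece "W6" labels = ("R", ([6] : List Int)) from rfl]
  by_cases hX6 : tok = "X6"
  · rw [hX6]; show (r ++ "R", ix ++ ([14] : List Int)) = _
    simp [show decodePiece "X6" labels = ("R", ([14] : List Int)) from rfl]
  by_cases hS6 : tok = "S6"
  · rw [hS6]; show (r ++ "S", ix ++ ([6] : List Int)) = _
    simp [show decodePiece "S6" labels = ("S", ([6] : List Int)) from rfl]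
  by_cases hW7 : tok = "W7"
  · rw [hW7]; show (r ++ "R", ix ++ ([7] : List Int)) = _
    simp [show decodePiece "W7" labels = ("R", ([7] : List Int)) from rfl]
  by_cases hX7 : tok = "X7"
  · rw [hX7]; show (r ++ "R", ix ++ ([15] : List Int)) = _
    simp [show decodePiece "X7" labels = ("R", ([15] : List Int)) from rfl]
  by_cases hS7 : tok = "S7"
  · rw [hS7]; show (r ++ "S", ix ++ ([7] : List Int)) = _
    simp [show decodePiece "S7" labels = ("S", ([7] : List Int)) from rfl]
  by_cases hA : tok = "A"
  · rw [hA]; show (r ++ "A", ix) = _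
    simp [show decodePiece "A" labels = ("A", ([] : List Int)) from rfl]
  cases hl : tok.toList with
  | nil =>
    have ht : tok = "" := String.ext_iff.mpr (by rw [hl]; rfl)
    rw [ht]
    show (r, ix) = _
    simp [show decodePiece "" labels = ("", ([] : List Int)) from rfl]
  | cons c cs =>
    rw [show PySem.List.pyRange 0 8 1 = [0,1,2,3,4,5,6,7] from by decide]
    by_cases hP : c = 'P'
    · subst hP
      simp [decodeScan, decodePiece, bRegs_eq, get?_mk_nil, PySem.Dict.get?_mk_cons, PySem.Dict.getD, beq_str_false, String.append_assoc, hl]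
    by_cases hH : c = '#'
    · subst hH
      simp [decodeScan, decodePiece, bRegs_eq, get?_mk_nil, PySem.Dict.get?_mk_cons, PySem.Dict.getD, beq_str_false, String.append_assoc, hl]
    by_cases hBc : c = 'B'
    · subst hBc
      simp [decodeScan, decodePiece, bRegs_eq, get?_mk_nil, PySem.Dict.get?_mk_cons, PySem.Dict.getD, beq_str_false, String.append_assoc, hl]
    by_cases hF : c = 'F'
    · subst hF
      simp [decodeScan, decodePiece, bRegs_eq, get?_mk_nil, PySem.Dict.get?_mk_cons, PySem.Dict.getD, beq_str_false, String.append_assoc, hl]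
    by_cases hDot : c = '.'
    · subst hDot
      simp [decodeScan, decodePiece, bRegs_eq, get?_mk_nil, PySem.Dict.get?_mk_cons, PySem.Dict.getD, beq_str_false, String.append_assoc, hl]
    by_cases hPc : c = '%'
    · subst hPc
      cases hg : (PySem.Dict.mk labels).get? (PySem.Str.slice tok (some 1) none) <;>
        simp [decodeScan, decodePiece, bRegs_eq, get?_mk_nil, PySem.Dict.get?_mk_cons, PySem.Dict.getD, beq_str_false, String.append_assoc, hl, hg]
    by_cases hD : c = '$'
    · subst hD
      by_cases hdW0 : cs = "W0".toList
      · rw [show tok = "$W0" from String.ext_iff.mpr (by rw [hl, hdW0]; rfl)]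
        show (r ++ "$R", ix ++ ([0] : List Int)) = _
        simp [show decodePiece "$W0" labels = ("$R", ([0] : List Int)) from rfl]
      by_cases hdT0 : cs = "T0".toList
      · rw [show tok = "$T0" from String.ext_iff.mpr (by rw [hl, hdT0]; rfl)]
        show (r ++ "$R", ix ++ ([8] : List Int)) = _
        simp [show decodePiece "$T0" labels = ("$R", ([8] : List Int)) from rfl]
      by_cases hdS0 : cs = "S0".toList
      · rw [show tok = "$S0" from String.ext_iff.mpr (by rw [hl, hdS0]; rfl)]
        show (r ++ "$S", ix ++ ([0] : List Int)) = _
        simp [show decodePiece "$S0" labels = ("$S", ([0] : List Int)) from rfl]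
      by_cases hdW1 : cs = "W1".toList
      · rw [show tok = "$W1" from String.ext_iff.mpr (by rw [hl, hdW1]; rfl)]
        show (r ++ "$R", ix ++ ([1] : List Int)) = _
        simp [show decodePiece "$W1" labels = ("$R", ([1] : List Int)) from rfl]
      by_cases hdT1 : cs = "T1".toList
      · rw [show tok = "$T1" from String.ext_iff.mpr (by rw [hl, hdT1]; rfl)]
        show (r ++ "$R", ix ++ ([9] : List Int)) = _
        simp [show decodePiece "$T1" labels = ("$R", ([9] : List Int)) from rfl]
      by_cases hdS1 : cs = "S1".toList
      · rw [show tok = "$S1" from String.ext_iff.mpr (by rw [hl, hdS1]; rfl)]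
        show (r ++ "$S", ix ++ ([1] : List Int)) = _
        simp [show decodePiece "$S1" labels = ("$S", ([1] : List Int)) from rfl]
      by_cases hdW2 : cs = "W2".toList
      · rw [show tok = "$W2" from String.ext_iff.mpr (by rw [hl, hdW2]; rfl)]
        show (r ++ "$R", ix ++ ([2] : List Int)) = _
        simp [show decodePiece "$W2" labels = ("$R", ([2] : List Int)) from rfl]
      by_cases hdT2 : cs = "T2".toList
      · rw [show tok = "$T2" from String.ext_iff.mpr (by rw [hl, hdT2]; rfl)]
        show (r ++ "$R", ix ++ ([10] : List Int)) = _
        simp [show decodePiece "$T2" labels = ("$R", ([10] : List Int)) from rfl]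
      by_cases hdS2 : cs = "S2".toList
      · rw [show tok = "$S2" from String.ext_iff.mpr (by rw [hl, hdS2]; rfl)]
        show (r ++ "$S", ix ++ ([2] : List Int)) = _
        simp [show decodePiece "$S2" labels = ("$S", ([2] : List Int)) from rfl]
      by_cases hdW3 : cs = "W3".toList
      · rw [show tok = "$W3" from String.ext_iff.mpr (by rw [hl, hdW3]; rfl)]
        show (r ++ "$R", ix ++ ([3] : List Int)) = _
        simp [show decodePiece "$W3" labels = ("$R", ([3] : List Int)) from rfl]
      by_cases hdT3 : cs = "T3".toList
      · rw [show tok = "$T3" from String.ext_iff.mpr (by rw [hl, hdT3]; rfl)]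
        show (r ++ "$R", ix ++ ([11] : List Int)) = _
        simp [show decodePiece "$T3" labels = ("$R", ([11] : List Int)) from rfl]
      by_cases hdS3 : cs = "S3".toList
      · rw [show tok = "$S3" from String.ext_iff.mpr (by rw [hl, hdS3]; rfl)]
        show (r ++ "$S", ix ++ ([3] : List Int)) = _
        simp [show decodePiece "$S3" labels = ("$S", ([3] : List Int)) from rfl]
      by_cases hdW4 : cs = "W4".toList
      · rw [show tok = "$W4" from String.ext_iff.mpr (by rw [hl, hdW4]; rfl)]
        show (r ++ "$R", ix ++ ([4] : List Int)) = _
        simp [show decodePiece "$W4" labels = ("$R", ([4] : List Int)) from rfl]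
      by_cases hdT4 : cs = "T4".toList
      · rw [show tok = "$T4" from String.ext_iff.mpr (by rw [hl, hdT4]; rfl)]
        show (r ++ "$R", ix ++ ([12] : List Int)) = _
        simp [show decodePiece "$T4" labels = ("$R", ([12] : List Int)) from rfl]
      by_cases hdS4 : cs = "S4".toList
      · rw [show tok = "$S4" from String.ext_iff.mpr (by rw [hl, hdS4]; rfl)]
        show (r ++ "$S", ix ++ ([4] : List Int)) = _
        simp [show decodePiece "$S4" labels = ("$S", ([4] : List Int)) from rfl]
      by_cases hdW5 : cs = "W5".toList
      · rw [show tok = "$W5" from String.ext_iff.mpr (by rw [hl, hdW5]; rfl)]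
        show (r ++ "$R", ix ++ ([5] : List Int)) = _
        simp [show decodePiece "$W5" labels = ("$R", ([5] : List Int)) from rfl]
      by_cases hdT5 : cs = "T5".toList
      · rw [show tok = "$T5" from String.ext_iff.mpr (by rw [hl, hdT5]; rfl)]
        show (r ++ "$R", ix ++ ([13] : List Int)) = _
        simp [show decodePiece "$T5" labels = ("$R", ([13] : List Int)) from rfl]
      by_cases hdS5 : cs = "S5".toList
      · rw [show tok = "$S5" from String.ext_iff.mpr (by rw [hl, hdS5]; rfl)]
        show (r ++ "$S", ix ++ ([5] : List Int)) = _
        simp [show decodePiece "$S5" labels = ("$S", ([5] : List Int)) from rfl]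
      by_cases hdW6 : cs = "W6".toList
      · rw [show tok = "$W6" from String.ext_iff.mpr (by rw [hl, hdW6]; rfl)]
        show (r ++ "$R", ix ++ ([6] : List Int)) = _
        simp [show decodePiece "$W6" labels = ("$R", ([6] : List Int)) from rfl]
      by_cases hdT6 : cs = "T6".toList
      · rw [show tok = "$T6" from String.ext_iff.mpr (by rw [hl, hdT6]; rfl)]
        show (r ++ "$R", ix ++ ([14] : List Int)) = _
        simp [show decodePiece "$T6" labels = ("$R", ([14] : List Int)) from rfl]
      by_cases hdS6 : cs = "S6".toList
      · rw [show tok = "$S6" from String.ext_iff.mpr (by rw [hl, hdS6]; rfl)]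
        show (r ++ "$S", ix ++ ([6] : List Int)) = _
        simp [show decodePiece "$S6" labels = ("$S", ([6] : List Int)) from rfl]
      by_cases hdW7 : cs = "W7".toList
      · rw [show tok = "$W7" from String.ext_iff.mpr (by rw [hl, hdW7]; rfl)]
        show (r ++ "$R", ix ++ ([7] : List Int)) = _
        simp [show decodePiece "$W7" labels = ("$R", ([7] : List Int)) from rfl]
      by_cases hdT7 : cs = "T7".toList
      · rw [show tok = "$T7" from String.ext_iff.mpr (by rw [hl, hdT7]; rfl)]
        show (r ++ "$R", ix ++ ([15] : List Int)) = _
        simp [show decodePiece "$T7" labels = ("$R", ([15] : List Int)) from rfl]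
      by_cases hdS7 : cs = "S7".toList
      · rw [show tok = "$S7" from String.ext_iff.mpr (by rw [hl, hdS7]; rfl)]
        show (r ++ "$S", ix ++ ([7] : List Int)) = _
        simp [show decodePiece "$S7" labels = ("$S", ([7] : List Int)) from rfl]
      by_cases hdA : cs = "A".toList
      · rw [show tok = "$A" from String.ext_iff.mpr (by rw [hl, hdA]; rfl)]
        show (r ++ "$A", ix) = _
        simp [show decodePiece "$A" labels = ("$A", ([] : List Int)) from rfl]
      have hsl : (PySem.Str.slice tok (some 1) none).toList = cs := by simp [PySem.Str.slice, hl, PySem.List.slice]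
      have ndW0 : ¬("W0".toList = cs) := fun e => hdW0 e.symm
      have ndT0 : ¬("T0".toList = cs) := fun e => hdT0 e.symm
      have ndS0 : ¬("S0".toList = cs) := fun e => hdS0 e.symm
      have ndW1 : ¬("W1".toList = cs) := fun e => hdW1 e.symm
      have ndT1 : ¬("T1".toList = cs) := fun e => hdT1 e.symm
      have ndS1 : ¬("S1".toList = cs) := fun e => hdS1 e.symm
      have ndW2 : ¬("W2".toList = cs) := fun e => hdW2 e.symm
      have ndT2 : ¬("T2".toList = cs) := fun e => hdT2 e.symm
      have ndS2 : ¬("S2".toList = cs) := fun e => hdS2 e.symm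
      have ndW3 : ¬("W3".toList = cs) := fun e => hdW3 e.symm
      have ndT3 : ¬("T3".toList = cs) := fun e => hdT3 e.symm
      have ndS3 : ¬("S3".toList = cs) := fun e => hdS3 e.symm
      have ndW4 : ¬("W4".toList = cs) := fun e => hdW4 e.symm
      have ndT4 : ¬("T4".toList = cs) := fun e => hdT4 e.symm
      have ndS4 : ¬("S4".toList = cs) := fun e => hdS4 e.symm
      have ndW5 : ¬("W5".toList = cs) := fun e => hdW5 e.symm
      have ndT5 : ¬("T5".toList = cs) := fun e => hdT5 e.symm
      have ndS5 : ¬("S5".toList = cs) := fun e => hdS5 e.symm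
      have ndW6 : ¬("W6".toList = cs) := fun e => hdW6 e.symm
      have ndT6 : ¬("T6".toList = cs) := fun e => hdT6 e.symm
      have ndS6 : ¬("S6".toList = cs) := fun e => hdS6 e.symm
      have ndW7 : ¬("W7".toList = cs) := fun e => hdW7 e.symm
      have ndT7 : ¬("T7".toList = cs) := fun e => hdT7 e.symm
      have ndS7 : ¬("S7".toList = cs) := fun e => hdS7 e.symm
      have ndA : ¬("A".toList = cs) := fun e => hdA e.symm
      have hqW0 : ¬(PySem.Str.slice tok (some 1) none = "W" ++ PySem.Int.toStr 0) := fun e => hdW0 (by rw [← hsl, e]; try rfl)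
      have hrW0 : ¬("W0" = PySem.Str.slice tok (some 1) none) := fun e => hdW0 (by rw [← hsl, ← e]; try rfl)
      have hqT0 : ¬(PySem.Str.slice tok (some 1) none = "T" ++ PySem.Int.toStr 0) := fun e => hdT0 (by rw [← hsl, e]; try rfl)
      have hrT0 : ¬("T0" = PySem.Str.slice tok (some 1) none) := fun e => hdT0 (by rw [← hsl, ← e]; try rfl)
      have hqS0 : ¬(PySem.Str.slice tok (some 1) none = "S" ++ PySem.Int.toStr 0) := fun e => hdS0 (by rw [← hsl, e]; try rfl)
      have hrS0 : ¬("S0" = PySem.Str.slice tok (some 1) none) := fun e => hdS0 (by rw [← hsl, ← e]; try rfl)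
      have hqW1 : ¬(PySem.Str.slice tok (some 1) none = "W" ++ PySem.Int.toStr 1) := fun e => hdW1 (by rw [← hsl, e]; try rfl)
      have hrW1 : ¬("W1" = PySem.Str.slice tok (some 1) none) := fun e => hdW1 (by rw [← hsl, ← e]; try rfl)
      have hqT1 : ¬(PySem.Str.slice tok (some 1) none = "T" ++ PySem.Int.toStr 1) := fun e => hdT1 (by rw [← hsl, e]; try rfl)
      have hrT1 : ¬("T1" = PySem.Str.slice tok (some 1) none) := fun e => hdT1 (by rw [← hsl, ← e]; try rfl)
      have hqS1 : ¬(PySem.Str.slice tok (some 1) none = "S" ++ PySem.Int.toStr 1) := fun e => hdS1 (by rw [← hsl, e]; try rfl)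
      have hrS1 : ¬("S1" = PySem.Str.slice tok (some 1) none) := fun e => hdS1 (by rw [← hsl, ← e]; try rfl)
      have hqW2 : ¬(PySem.Str.slice tok (some 1) none = "W" ++ PySem.Int.toStr 2) := fun e => hdW2 (by rw [← hsl, e]; try rfl)
      have hrW2 : ¬("W2" = PySem.Str.slice tok (some 1) none) := fun e => hdW2 (by rw [← hsl, ← e]; try rfl)
      have hqT2 : ¬(PySem.Str.slice tok (some 1) none = "T" ++ PySem.Int.toStr 2) := fun e => hdT2 (by rw [← hsl, e]; try rfl)
      have hrT2 : ¬("T2" = PySem.Str.slice tok (some 1) none) := fun e => hdT2 (by rw [← hsl, ← e]; try rfl)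
      have hqS2 : ¬(PySem.Str.slice tok (some 1) none = "S" ++ PySem.Int.toStr 2) := fun e => hdS2 (by rw [← hsl, e]; try rfl)
      have hrS2 : ¬("S2" = PySem.Str.slice tok (some 1) none) := fun e => hdS2 (by rw [← hsl, ← e]; try rfl)
      have hqW3 : ¬(PySem.Str.slice tok (some 1) none = "W" ++ PySem.Int.toStr 3) := fun e => hdW3 (by rw [← hsl, e]; try rfl)
      have hrW3 : ¬("W3" = PySem.Str.slice tok (some 1) none) := fun e => hdW3 (by rw [← hsl, ← e]; try rfl)
      have hqT3 : ¬(PySem.Str.slice tok (some 1) none = "T" ++ PySem.Int.toStr 3) := fun e => hdT3 (by rw [← hsl, e]; try rfl)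
      have hrT3 : ¬("T3" = PySem.Str.slice tok (some 1) none) := fun e => hdT3 (by rw [← hsl, ← e]; try rfl)
      have hqS3 : ¬(PySem.Str.slice tok (some 1) none = "S" ++ PySem.Int.toStr 3) := fun e => hdS3 (by rw [← hsl, e]; try rfl)
      have hrS3 : ¬("S3" = PySem.Str.slice tok (some 1) none) := fun e => hdS3 (by rw [← hsl, ← e]; try rfl)
      have hqW4 : ¬(PySem.Str.slice tok (some 1) none = "W" ++ PySem.Int.toStr 4) := fun e => hdW4 (by rw [← hsl, e]; try rfl)
      have hrW4 : ¬("W4" = PySem.Str.slice tok (some 1) none) := fun e => hdW4 (by rw [← hsl, ← e]; try rfl)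
      have hqT4 : ¬(PySem.Str.slice tok (some 1) none = "T" ++ PySem.Int.toStr 4) := fun e => hdT4 (by rw [← hsl, e]; try rfl)
      have hrT4 : ¬("T4" = PySem.Str.slice tok (some 1) none) := fun e => hdT4 (by rw [← hsl, ← e]; try rfl)
      have hqS4 : ¬(PySem.Str.slice tok (some 1) none = "S" ++ PySem.Int.toStr 4) := fun e => hdS4 (by rw [← hsl, e]; try rfl)
      have hrS4 : ¬("S4" = PySem.Str.slice tok (some 1) none) := fun e => hdS4 (by rw [← hsl, ← e]; try rfl)
      have hqW5 : ¬(PySem.Str.slice tok (some 1) none = "W" ++ PySem.Int.toStr 5) := fun e => hdW5 (by rw [← hsl, e]; try rfl)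
      have hrW5 : ¬("W5" = PySem.Str.slice tok (some 1) none) := fun e => hdW5 (by rw [← hsl, ← e]; try rfl)
      have hqT5 : ¬(PySem.Str.slice tok (some 1) none = "T" ++ PySem.Int.toStr 5) := fun e => hdT5 (by rw [← hsl, e]; try rfl)
      have hrT5 : ¬("T5" = PySem.Str.slice tok (some 1) none) := fun e => hdT5 (by rw [← hsl, ← e]; try rfl)
      have hqS5 : ¬(PySem.Str.slice tok (some 1) none = "S" ++ PySem.Int.toStr 5) := fun e => hdS5 (by rw [← hsl, e]; try rfl)
      have hrS5 : ¬("S5" = PySem.Str.slice tok (some 1) none) := fun e => hdS5 (by rw [← hsl, ← e]; try rfl)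
      have hqW6 : ¬(PySem.Str.slice tok (some 1) none = "W" ++ PySem.Int.toStr 6) := fun e => hdW6 (by rw [← hsl, e]; try rfl)
      have hrW6 : ¬("W6" = PySem.Str.slice tok (some 1) none) := fun e => hdW6 (by rw [← hsl, ← e]; try rfl)
      have hqT6 : ¬(PySem.Str.slice tok (some 1) none = "T" ++ PySem.Int.toStr 6) := fun e => hdT6 (by rw [← hsl, e]; try rfl)
      have hrT6 : ¬("T6" = PySem.Str.slice tok (some 1) none) := fun e => hdT6 (by rw [← hsl, ← e]; try rfl)
      have hqS6 : ¬(PySem.Str.slice tok (some 1) none = "S" ++ PySem.Int.toStr 6) := fun e => hdS6 (by rw [← hsl, e]; try rfl)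
      have hrS6 : ¬("S6" = PySem.Str.slice tok (some 1) none) := fun e => hdS6 (by rw [← hsl, ← e]; try rfl)
      have hqW7 : ¬(PySem.Str.slice tok (some 1) none = "W" ++ PySem.Int.toStr 7) := fun e => hdW7 (by rw [← hsl, e]; try rfl)
      have hrW7 : ¬("W7" = PySem.Str.slice tok (some 1) none) := fun e => hdW7 (by rw [← hsl, ← e]; try rfl)
      have hqT7 : ¬(PySem.Str.slice tok (some 1) none = "T" ++ PySem.Int.toStr 7) := fun e => hdT7 (by rw [← hsl, e]; try rfl)
      have hrT7 : ¬("T7" = PySem.Str.slice tok (some 1) none) := fun e => hdT7 (by rw [← hsl, ← e]; try rfl)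
      have hqS7 : ¬(PySem.Str.slice tok (some 1) none = "S" ++ PySem.Int.toStr 7) := fun e => hdS7 (by rw [← hsl, e]; try rfl)
      have hrS7 : ¬("S7" = PySem.Str.slice tok (some 1) none) := fun e => hdS7 (by rw [← hsl, ← e]; try rfl)
      have hqA : ¬(PySem.Str.slice tok (some 1) none = "A") := fun e => hdA (by rw [← hsl, e]; try rfl)
      have hrA : ¬("A" = PySem.Str.slice tok (some 1) none) := fun e => hdA (by rw [← hsl, ← e]; try rfl)
      simp [decodeScan, decodePiece, bRegs_eq, get?_mk_nil, PySem.Dict.get?_mk_cons, PySem.Dict.getD, beq_str_false, String.append_assoc, hl,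
            show (PySem.Str.slice tok (some 1) none).toList = cs from by simp [PySem.Str.slice, hl, PySem.List.slice],
            hdW0, hdT0, hdS0, hdW1, hdT1, hdS1, hdW2, hdT2, hdS2, hdW3, hdT3, hdS3, hdW4, hdT4, hdS4, hdW5, hdT5, hdS5, hdW6, hdT6, hdS6, hdW7, hdT7, hdS7, hdA, ndW0, ndT0, ndS0, ndW1, ndT1, ndS1, ndW2, ndT2, ndS2, ndW3, ndT3, ndS3, ndW4, ndT4, ndS4, ndW5, ndT5, ndS5, ndW6, ndT6, ndS6, ndW7, ndT7, ndS7, ndA, hqW0, hqT0, hqS0, hqW1, hqT1, hqS1, hqW2, hqT2, hqS2, hqW3, hqT3, hqS3, hqW4, hqT4, hqS4, hqW5, hqT5, hqS5, hqW6, hqT6, hqS6, hqW7, hqT7, hqS7, hqA, hrW0, hrT0, hrS0, hrW1, hrT1, hrS1, hrW2, hrT2, hrS2, hrW3, hrT3, hrS3, hrW4, hrT4, hrS4, hrW5, hrT5, hrS5, hrW6, hrT6, hrS6, hrW7, hrT7, hrS7, hrA]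
    have _hb : True := trivial
    have mW0 : ¬("W0" = tok) := fun e => hW0 e.symm
    have mX0 : ¬("X0" = tok) := fun e => hX0 e.symm
    have mS0 : ¬("S0" = tok) := fun e => hS0 e.symm
    have mW1 : ¬("W1" = tok) := fun e => hW1 e.symm
    have mX1 : ¬("X1" = tok) := fun e => hX1 e.symm
    have mS1 : ¬("S1" = tok) := fun e => hS1 e.symm
    have mW2 : ¬("W2" = tok) := fun e => hW2 e.symm
    have mX2 : ¬("X2" = tok) := fun e => hX2 e.symm
    have mS2 : ¬("S2" = tok) := fun e => hS2 e.symm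
    have mW3 : ¬("W3" = tok) := fun e => hW3 e.symm
    have mX3 : ¬("X3" = tok) := fun e => hX3 e.symm
    have mS3 : ¬("S3" = tok) := fun e => hS3 e.symm
    have mW4 : ¬("W4" = tok) := fun e => hW4 e.symm
    have mX4 : ¬("X4" = tok) := fun e => hX4 e.symm
    have mS4 : ¬("S4" = tok) := fun e => hS4 e.symm
    have mW5 : ¬("W5" = tok) := fun e => hW5 e.symm
    have mX5 : ¬("X5" = tok) := fun e => hX5 e.symm
    have mS5 : ¬("S5" = tok) := fun e => hS5 e.symm
    have mW6 : ¬("W6" = tok) := fun e => hW6 e.symm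
    have mX6 : ¬("X6" = tok) := fun e => hX6 e.symm
    have mS6 : ¬("S6" = tok) := fun e => hS6 e.symm
    have mW7 : ¬("W7" = tok) := fun e => hW7 e.symm
    have mX7 : ¬("X7" = tok) := fun e => hX7 e.symm
    have mS7 : ¬("S7" = tok) := fun e => hS7 e.symm
    have mA : ¬("A" = tok) := fun e => hA e.symm
    have nW0 : ¬("W0".toList = tok.toList) := fun e => hW0 (String.ext_iff.mpr e.symm)
    have sW0 : ¬(tok.toList = "W0".toList) := fun e => hW0 (String.ext_iff.mpr e)
    have nX0 : ¬("X0".toList = tok.toList) := fun e => hX0 (String.ext_iff.mpr e.symm)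
    have sX0 : ¬(tok.toList = "X0".toList) := fun e => hX0 (String.ext_iff.mpr e)
    have nS0 : ¬("S0".toList = tok.toList) := fun e => hS0 (String.ext_iff.mpr e.symm)
    have sS0 : ¬(tok.toList = "S0".toList) := fun e => hS0 (String.ext_iff.mpr e)
    have nW1 : ¬("W1".toList = tok.toList) := fun e => hW1 (String.ext_iff.mpr e.symm)
    have sW1 : ¬(tok.toList = "W1".toList) := fun e => hW1 (String.ext_iff.mpr e)
    have nX1 : ¬("X1".toList = tok.toList) := fun e => hX1 (String.ext_iff.mpr e.symm)
    have sX1 : ¬(tok.toList = "X1".toList) := fun e => hX1 (String.ext_iff.mpr e)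
    have nS1 : ¬("S1".toList = tok.toList) := fun e => hS1 (String.ext_iff.mpr e.symm)
    have sS1 : ¬(tok.toList = "S1".toList) := fun e => hS1 (String.ext_iff.mpr e)
    have nW2 : ¬("W2".toList = tok.toList) := fun e => hW2 (String.ext_iff.mpr e.symm)
    have sW2 : ¬(tok.toList = "W2".toList) := fun e => hW2 (String.ext_iff.mpr e)
    have nX2 : ¬("X2".toList = tok.toList) := fun e => hX2 (String.ext_iff.mpr e.symm)
    have sX2 : ¬(tok.toList = "X2".toList) := fun e => hX2 (String.ext_iff.mpr e)
    have nS2 : ¬("S2".toList = tok.toList) := fun e => hS2 (String.ext_iff.mpr e.symm)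
    have sS2 : ¬(tok.toList = "S2".toList) := fun e => hS2 (String.ext_iff.mpr e)
    have nW3 : ¬("W3".toList = tok.toList) := fun e => hW3 (String.ext_iff.mpr e.symm)
    have sW3 : ¬(tok.toList = "W3".toList) := fun e => hW3 (String.ext_iff.mpr e)
    have nX3 : ¬("X3".toList = tok.toList) := fun e => hX3 (String.ext_iff.mpr e.symm)
    have sX3 : ¬(tok.toList = "X3".toList) := fun e => hX3 (String.ext_iff.mpr e)
    have nS3 : ¬("S3".toList = tok.toList) := fun e => hS3 (String.ext_iff.mpr e.symm)
    have sS3 : ¬(tok.toList = "S3".toList) := fun e => hS3 (String.ext_iff.mpr e)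
    have nW4 : ¬("W4".toList = tok.toList) := fun e => hW4 (String.ext_iff.mpr e.symm)
    have sW4 : ¬(tok.toList = "W4".toList) := fun e => hW4 (String.ext_iff.mpr e)
    have nX4 : ¬("X4".toList = tok.toList) := fun e => hX4 (String.ext_iff.mpr e.symm)
    have sX4 : ¬(tok.toList = "X4".toList) := fun e => hX4 (String.ext_iff.mpr e)
    have nS4 : ¬("S4".toList = tok.toList) := fun e => hS4 (String.ext_iff.mpr e.symm)
    have sS4 : ¬(tok.toList = "S4".toList) := fun e => hS4 (String.ext_iff.mpr e)
    have nW5 : ¬("W5".toList = tok.toList) := fun e => hW5 (String.ext_iff.mpr e.symm)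
    have sW5 : ¬(tok.toList = "W5".toList) := fun e => hW5 (String.ext_iff.mpr e)
    have nX5 : ¬("X5".toList = tok.toList) := fun e => hX5 (String.ext_iff.mpr e.symm)
    have sX5 : ¬(tok.toList = "X5".toList) := fun e => hX5 (String.ext_iff.mpr e)
    have nS5 : ¬("S5".toList = tok.toList) := fun e => hS5 (String.ext_iff.mpr e.symm)
    have sS5 : ¬(tok.toList = "S5".toList) := fun e => hS5 (String.ext_iff.mpr e)
    have nW6 : ¬("W6".toList = tok.toList) := fun e => hW6 (String.ext_iff.mpr e.symm)
    have sW6 : ¬(tok.toList = "W6".toList) := fun e => hW6 (String.ext_iff.mpr e)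
    have nX6 : ¬("X6".toList = tok.toList) := fun e => hX6 (String.ext_iff.mpr e.symm)
    have sX6 : ¬(tok.toList = "X6".toList) := fun e => hX6 (String.ext_iff.mpr e)
    have nS6 : ¬("S6".toList = tok.toList) := fun e => hS6 (String.ext_iff.mpr e.symm)
    have sS6 : ¬(tok.toList = "S6".toList) := fun e => hS6 (String.ext_iff.mpr e)
    have nW7 : ¬("W7".toList = tok.toList) := fun e => hW7 (String.ext_iff.mpr e.symm)
    have sW7 : ¬(tok.toList = "W7".toList) := fun e => hW7 (String.ext_iff.mpr e)
    have nX7 : ¬("X7".toList = tok.toList) := fun e => hX7 (String.ext_iff.mpr e.symm)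
    have sX7 : ¬(tok.toList = "X7".toList) := fun e => hX7 (String.ext_iff.mpr e)
    have nS7 : ¬("S7".toList = tok.toList) := fun e => hS7 (String.ext_iff.mpr e.symm)
    have sS7 : ¬(tok.toList = "S7".toList) := fun e => hS7 (String.ext_iff.mpr e)
    have nA : ¬("A".toList = tok.toList) := fun e => hA (String.ext_iff.mpr e.symm)
    have sA : ¬(tok.toList = "A".toList) := fun e => hA (String.ext_iff.mpr e)
    have pW0 : ¬(tok = "W" ++ PySem.Int.toStr 0) := fun e => hW0 (e.trans (by decide))
    have pX0 : ¬(tok = "X" ++ PySem.Int.toStr 0) := fun e => hX0 (e.trans (by decide))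
    have pS0 : ¬(tok = "S" ++ PySem.Int.toStr 0) := fun e => hS0 (e.trans (by decide))
    have pW1 : ¬(tok = "W" ++ PySem.Int.toStr 1) := fun e => hW1 (e.trans (by decide))
    have pX1 : ¬(tok = "X" ++ PySem.Int.toStr 1) := fun e => hX1 (e.trans (by decide))
    have pS1 : ¬(tok = "S" ++ PySem.Int.toStr 1) := fun e => hS1 (e.trans (by decide))
    have pW2 : ¬(tok = "W" ++ PySem.Int.toStr 2) := fun e => hW2 (e.trans (by decide))
    have pX2 : ¬(tok = "X" ++ PySem.Int.toStr 2) := fun e => hX2 (e.trans (by decide))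
    have pS2 : ¬(tok = "S" ++ PySem.Int.toStr 2) := fun e => hS2 (e.trans (by decide))
    have pW3 : ¬(tok = "W" ++ PySem.Int.toStr 3) := fun e => hW3 (e.trans (by decide))
    have pX3 : ¬(tok = "X" ++ PySem.Int.toStr 3) := fun e => hX3 (e.trans (by decide))
    have pS3 : ¬(tok = "S" ++ PySem.Int.toStr 3) := fun e => hS3 (e.trans (by decide))
    have pW4 : ¬(tok = "W" ++ PySem.Int.toStr 4) := fun e => hW4 (e.trans (by decide))
    have pX4 : ¬(tok = "X" ++ PySem.Int.toStr 4) := fun e => hX4 (e.trans (by decide))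
    have pS4 : ¬(tok = "S" ++ PySem.Int.toStr 4) := fun e => hS4 (e.trans (by decide))
    have pW5 : ¬(tok = "W" ++ PySem.Int.toStr 5) := fun e => hW5 (e.trans (by decide))
    have pX5 : ¬(tok = "X" ++ PySem.Int.toStr 5) := fun e => hX5 (e.trans (by decide))
    have pS5 : ¬(tok = "S" ++ PySem.Int.toStr 5) := fun e => hS5 (e.trans (by decide))
    have pW6 : ¬(tok = "W" ++ PySem.Int.toStr 6) := fun e => hW6 (e.trans (by decide))
    have pX6 : ¬(tok = "X" ++ PySem.Int.toStr 6) := fun e => hX6 (e.trans (by decide))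
    have pS6 : ¬(tok = "S" ++ PySem.Int.toStr 6) := fun e => hS6 (e.trans (by decide))
    have pW7 : ¬(tok = "W" ++ PySem.Int.toStr 7) := fun e => hW7 (e.trans (by decide))
    have pX7 : ¬(tok = "X" ++ PySem.Int.toStr 7) := fun e => hX7 (e.trans (by decide))
    have pS7 : ¬(tok = "S" ++ PySem.Int.toStr 7) := fun e => hS7 (e.trans (by decide))
    have pA : ¬(tok = "A") := hA
    have hpiece : decodePiece tok labels = ("", []) := by
      simp [decodePiece, bRegs_eq, get?_mk_nil, PySem.Dict.get?_mk_cons, hl, hP, hH, hBc, hF, hDot, hPc, hD, mW0, mX0, mS0, mW1, mX1, mS1, mW2, mX2, mS2, mW3, mX3, mS3, mW4, mX4, mS4, mW5, mX5, mS5, mW6, mX6, mS6, mW7, mX7, mS7, mA]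
    simp [decodeScan, hpiece, hl, hP, hH, hBc, hF, hDot, hPc, hD, pW0, pX0, pS0, pW1, pX1, pS1, pW2, pX2, pS2, pW3, pX3, pS3, pW4, pX4, pS4, pW5, pX5, pS5, pW6, pX6, pS6, pW7, pX7, pS7, pA]


theorem getD_map_strip0 (l : List String) :
    PySem.List.pyGetD (l.map PySem.Str.strip) (0 : Int) "" = PySem.Str.strip (PySem.List.pyGetD l (0 : Int) "") := by
  cases l <;> simp [pysem, PySem.List.pyGetD] <;> rfl

theorem getD_map_strip1 (l : List String) :
    PySem.List.pyGetD (l.map PySem.Str.strip) (1 : Int) "" = PySem.Str.strip (PySem.List.pyGetD l (1 : Int) "") := by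
  cases l with
  | nil => simp [pysem, PySem.List.pyGetD]; rfl
  | cons a t => cases t <;> simp [pysem, PySem.List.pyGetD] <;> rfl

theorem join2 (x y : String) : PySem.Str.join "," [x, y] = x ++ "," ++ y := by
  rw [String.ext_iff, PySem.Str.toList_join]
  simp only [List.map_cons, List.map_nil, PySem.Chars.join_cons_cons, PySem.Chars.join_singleton,
    String.toList_append]

theorem join0 : PySem.Str.join "," ([] : List String) = "" := rfl

theorem getD2_1 (x0 x1 : String) : PySem.List.pyGetD [x0, x1] (1 : Int) "" = x1 := by
  simp [pysem]

theorem getD3_1 (x0 x1 x2 : String) : PySem.List.pyGetD [x0, x1, x2] (1 : Int) "" = x1 := by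
  simp [pysem]

theorem getD3_2 (x0 x1 x2 : String) : PySem.List.pyGetD [x0, x1, x2] (2 : Int) "" = x2 := by
  simp [pysem]

theorem getD_cons_1 (x0 x1 : String) (rest : List String) :
    PySem.List.pyGetD (x0 :: x1 :: rest) (1 : Int) "" = x1 := by
  simp [pysem]

theorem join1 (x : String) : PySem.Str.join "," [x] = x := by
  rw [String.ext_iff, PySem.Str.toList_join]
  simp only [List.map_cons, List.map_nil, PySem.Chars.join_singleton]

set_option maxRecDepth 4000 in
theorem decode_eq_alt (_op : String) (labels : List (String × Int)) :
    decode _op labels = decode_alt _op labels := by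
  unfold decode decode_alt
  by_cases hc : PySem.Str.isIn "," _op = true
  · simp only [hc, if_true, if_pos]
    rw [show PySem.List.pyRange 0 (PySem.List.len
      [PySem.List.pyGetD (pvSplit _op "\\") 0 "",
       PySem.List.pyGetD ((pvSplit (PySem.List.pyGetD (pvSplit _op "\\") 1 "") ",").map PySem.Str.strip) 0 "",
       PySem.List.pyGetD ((pvSplit (PySem.List.pyGetD (pvSplit _op "\\") 1 "") ",").map PySem.Str.strip) 1 ""]) 1
        = [0, 1, 2] from by simp [PySem.List.len_eq]; decide]
    simp only [List.foldl]
    simp [PySem.List.len_eq, scan_eq, getD_map_strip0, getD_map_strip1, join2, String.append_assoc,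
          getD3_1, getD3_2, PySem.List.pyGetD_natCast]
  · simp only [hc, if_false, Bool.false_eq_true]
    generalize pvSplit _op "\\" = P
    rcases P with _ | ⟨a, _ | ⟨b, t⟩⟩
    · simp [PySem.List.len_eq, PySem.List.pyRange, join0]
    · rw [if_neg (by simp)]
      rw [show PySem.List.pyRange 0 (PySem.List.len [a]) 1 = [0] from by simp [PySem.List.len_eq]; decide]
      simp [List.foldl, PySem.List.len_eq, PySem.List.pyRange, join0]
    · have hlen : 1 < (a :: b :: t).length := by simp
      simp only [List.length_map, if_pos hlen]
      rw [show PySem.List.pyRange 0 (PySem.List.len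
        [PySem.List.pyGetD (a :: b :: t) 0 "",
         PySem.List.pyGetD ((a :: b :: t).map PySem.Str.strip) 1 ""]) 1 = [0, 1] from by
          simp [PySem.List.len_eq]; decide]
      simp only [List.foldl]
      simp [PySem.List.len_eq, scan_eq, getD_map_strip1, join1, getD2_1, getD_cons_1, String.append_assoc]


-- ===== VERDICT (by name: the statement is the Claim_ definition above) =====
theorem decode_spec : Claim_equal_decode := by
  intro _op labels _dom _pre
  unfold Spec_decode
  exact decode_eq_alt _op labels
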